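-- pv_equiv track=rewrite | github.com/eddi7/fits | fits/analyzers/dtk.py | _module_for_case
-- ===== SOURCE A (Python) =====
-- def _module_for_case(case: str, case_to_module: dict[str, str]) -> str | None:
--     best_match: str | None = None
--     best_length = 0
--
--     for casename, module in case_to_module.items():
--         if not case.startswith(casename):
--             continue
--
--         if len(casename) > best_length:
--             best_match = module
--             best_length = len(casename)
--
--     return best_match
-- ===== SOURCE B (Python) =====
-- def _module_for_case(case: str, case_to_module: dict[str, str]) -> str | None:
--     max_len = max(map(len, case_to_module), default=0)
--     for L in range(min(len(case), max_len), 0, -1):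
--         module = case_to_module.get(case[:L])
--         if module is not None:
--             return module
--     return None
-- ===== Notes on version B (the rewrite author's own statement) =====
-- stated objective: alternative
-- what changed: Instead of scanning every dict entry and tracking the longest matching key, B probes prefixes of `case` from longest to shortest (capped by the longest key length) with dict lookups and returns at the first hit.
import Mathlib
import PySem

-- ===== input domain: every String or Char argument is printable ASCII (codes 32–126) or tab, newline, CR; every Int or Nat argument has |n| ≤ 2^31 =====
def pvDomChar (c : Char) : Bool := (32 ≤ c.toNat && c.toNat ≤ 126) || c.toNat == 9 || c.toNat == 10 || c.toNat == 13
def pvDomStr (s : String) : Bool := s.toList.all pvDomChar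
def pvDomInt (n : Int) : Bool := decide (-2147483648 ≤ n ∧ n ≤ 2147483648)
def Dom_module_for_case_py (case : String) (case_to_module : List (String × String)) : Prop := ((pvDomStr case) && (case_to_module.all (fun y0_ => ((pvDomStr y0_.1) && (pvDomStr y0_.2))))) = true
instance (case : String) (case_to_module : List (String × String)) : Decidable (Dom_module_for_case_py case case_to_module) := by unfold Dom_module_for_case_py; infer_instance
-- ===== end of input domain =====

-- B replaces A's scan of every dict entry (tracking the longest prefix key) by probing the
-- prefixes of `case` from longest to shortest (capped by the longest key length) with direct
-- dict lookups, returning at the first hit; same cost, different algorithm.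

-- ===== PORT A =====
-- the for-loop over the dict items, state (best_match, best_length)
def loopA (case : String) : List (String × String) → Option String × Int → Option String × Int
  | [], acc => acc
  | (casename, module_) :: t, acc =>
      loopA case t
        (if PySem.Str.startswith case casename then
          (if PySem.Str.len casename > acc.2 then (some module_, PySem.Str.len casename) else acc)
        else acc)

def module_for_case_py (case : String) (case_to_module : List (String × String)) : Option String :=
  (loopA case case_to_module (none, 0)).1

-- ===== PORT B =====
-- dict.get on the association list: first match
def lookupB (d : List (String × String)) (s : String) : Option String :=
  (d.find? (fun p => p.1 == s)).map (·.2)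

-- max(map(len, case_to_module), default=0): fold of max over the key lengths
def maxKeyLen (d : List (String × String)) : Nat :=
  d.foldl (fun m p => max m p.1.toList.length) 0

-- for L in range(min(len(case), max_len), 0, -1): descending structural recursion on L (len = char count)
def loopB (case : String) (d : List (String × String)) : Nat → Option String
  | 0 => none
  | (L+1) =>
      match lookupB d (PySem.Str.slice case none (some ((L + 1 : Nat) : Int))) with
      | some m => some m
      | none => loopB case d L

def module_for_case_py_alt (case : String) (case_to_module : List (String × String)) : Option String :=
  loopB case case_to_module (min case.toList.length (maxKeyLen case_to_module))

-- ===== PRECONDITION & SPEC =====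
def Spec_module_for_case_py (case : String) (case_to_module : List (String × String)) (out : Option String) : Prop := out = module_for_case_py_alt case case_to_module
instance (case : String) (case_to_module : List (String × String)) (out : Option String) : Decidable (Spec_module_for_case_py case case_to_module out) := by unfold Spec_module_for_case_py; infer_instance

-- ===== CLAIM (what is proved, stated in full; the proofs are below) =====
def Claim_equal_module_for_case_py : Prop := ∀ (case : String) (case_to_module : List (String × String)), Dom_module_for_case_py case case_to_module → Spec_module_for_case_py case case_to_module (module_for_case_py case case_to_module)

-- ===== LEMMAS AND PROOFS =====

-- list-level first-match lookup
def lkp : List (String × String) → List Char → Option String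
  | [], _ => none
  | (k, v) :: t, key => if k.toList = key then some v else lkp t key

-- the final value of best_length: max length of a key that prefixes cs (starting from l)
def bl (cs : List Char) : List (String × String) → Nat → Nat
  | [], l => l
  | (k, _) :: t, l => bl cs t (if k.toList <+: cs ∧ l < k.toList.length then k.toList.length else l)

theorem str_toList_inj {a b : String} (h : a.toList = b.toList) : a = b := by
  have := congrArg String.ofList h
  simpa using this

theorem lookupB_eq_lkp (d : List (String × String)) (s : String) :
    lookupB d s = lkp d s.toList := by
  induction d with
  | nil => rfl
  | cons p t ih =>
      obtain ⟨k, v⟩ := p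
      simp only [lookupB, List.find?, lkp] at *
      by_cases h : k = s
      · subst h; simp
      · have hb : (k == s) = false := by simp [h]
        have hl : ¬ (k.toList = s.toList) := fun hc => h (str_toList_inj hc)
        simp [hb, hl, ih]

theorem lkp_isSome (d : List (String × String)) :
    ∀ {key : List Char} {k v : String}, (k, v) ∈ d → k.toList = key → (lkp d key).isSome := by
  induction d with
  | nil => intro _ _ _ hm; simp at hm
  | cons p t ih =>
      intro key k v hm hk
      obtain ⟨k', v'⟩ := p
      rcases List.mem_cons.mp hm with h | h
      · obtain ⟨h1, h2⟩ := Prod.mk.injEq .. ▸ h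
        simp [lkp, h1 ▸ hk]
      · by_cases he : k'.toList = key
        · simp [lkp, he]
        · simpa [lkp, he] using ih h hk

theorem bl_le (cs : List Char) (d : List (String × String)) (l : Nat) : l ≤ bl cs d l := by
  induction d generalizing l with
  | nil => simp [bl]
  | cons p t ih =>
      obtain ⟨k, v⟩ := p
      simp only [bl]
      split_ifs with h
      · exact le_trans (le_of_lt h.2) (ih _)
      · exact ih l

theorem bl_le_len (cs : List Char) (d : List (String × String)) (l : Nat) (hl : l ≤ cs.length) :
    bl cs d l ≤ cs.length := by
  induction d generalizing l with
  | nil => simpa [bl]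
  | cons p t ih =>
      obtain ⟨k, v⟩ := p
      simp only [bl]
      split_ifs with h
      · exact ih _ (h.1.length_le)
      · exact ih l hl

theorem bl_ge (cs : List Char) (d : List (String × String)) :
    ∀ (l : Nat) {k v : String}, (k, v) ∈ d → k.toList <+: cs → k.toList.length ≤ bl cs d l := by
  induction d with
  | nil => intro _ _ _ hm; simp at hm
  | cons p t ih =>
      intro l k v hm hp
      obtain ⟨k', v'⟩ := p
      rcases List.mem_cons.mp hm with h | h
      · obtain ⟨h1, h2⟩ := Prod.mk.injEq .. ▸ h
        subst h1
        simp only [bl]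
        split_ifs with hc
        · exact bl_le cs t _
        · have : k.toList.length ≤ l := by
            by_contra hn
            exact hc ⟨hp, Nat.lt_of_not_le hn⟩
          exact le_trans this (bl_le cs t l)
      · exact ih _ h hp

theorem bl_ach (cs : List Char) (d : List (String × String)) (l : Nat) :
    bl cs d l = l ∨ ∃ k v, (k, v) ∈ d ∧ k.toList <+: cs ∧ k.toList.length = bl cs d l := by
  induction d generalizing l with
  | nil => left; rfl
  | cons p t ih =>
      obtain ⟨k, v⟩ := p
      simp only [bl]
      split_ifs with h
      · rcases ih k.toList.length with he | ⟨k', v', hm, hp, hl⟩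
        · right; exact ⟨k, v, List.mem_cons_self .., h.1, he.symm ▸ rfl⟩
        · right; exact ⟨k', v', List.mem_cons_of_mem _ hm, hp, hl⟩
      · rcases ih l with he | ⟨k', v', hm, hp, hl⟩
        · left; exact he
        · right; exact ⟨k', v', List.mem_cons_of_mem _ hm, hp, hl⟩

-- a prefix key equals take m iff its length is m
theorem take_eq_iff {cs : List Char} {k : String} (hp : k.toList <+: cs) {m : Nat}
    (hm : m ≤ cs.length) : k.toList = cs.take m ↔ k.toList.length = m := by
  constructor
  · intro h; rw [h]; simp [hm]
  · intro h; rw [List.prefix_iff_eq_take.mp hp, h]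

-- characterization of A's loop
theorem loopA_fst (case : String) (d : List (String × String)) (b : Option String) (l : Nat)
    (hl : l ≤ case.toList.length) :
    (loopA case d (b, (l : Int))).1 =
      if bl case.toList d l = l then b else lkp d (case.toList.take (bl case.toList d l)) := by
  induction d generalizing b l with
  | nil => simp [loopA, bl]
  | cons p t ih =>
      obtain ⟨k, v⟩ := p
      have hsw : PySem.Str.startswith case k = true ↔ k.toList <+: case.toList := by
        simp [PySem.Chars.startswith_iff]
      have hlen : PySem.Str.len k = (k.toList.length : Int) := by
        simp [PySem.Str.len_eq]
      by_cases hpre : k.toList <+: case.toList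
      · by_cases hgt : l < k.toList.length
        · -- taken branch
          have hcond : k.toList <+: case.toList ∧ l < k.toList.length := ⟨hpre, hgt⟩
          have hL : loopA case ((k, v) :: t) (b, (l : Int)) =
              loopA case t (some v, (k.toList.length : Int)) := by
            simp only [loopA]
            rw [if_pos (hsw.mpr hpre),
              if_pos (show PySem.Str.len k > ((b, (l : Int)).2) by
                rw [hlen]; show (k.toList.length : Int) > ((l : Nat) : Int)
                exact_mod_cast hgt), hlen]
          have hR : bl case.toList ((k, v) :: t) l = bl case.toList t k.toList.length := by
            simp only [bl]; rw [if_pos hcond]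
          have hk_le : k.toList.length ≤ case.toList.length := hpre.length_le
          rw [hL, hR, ih (some v) k.toList.length hk_le]
          have hge : k.toList.length ≤ bl case.toList t k.toList.length := bl_le _ _ _
          have hle : bl case.toList t k.toList.length ≤ case.toList.length :=
            bl_le_len _ _ _ hk_le
          rw [if_neg (show ¬ bl case.toList t k.toList.length = l by omega)]
          by_cases heq : bl case.toList t k.toList.length = k.toList.length
          · rw [if_pos heq]
            simp only [lkp]
            rw [if_pos ((take_eq_iff hpre hle).mpr heq.symm)]
          · rw [if_neg heq]
            simp only [lkp]
            rw [if_neg (fun hc => heq ((take_eq_iff hpre hle).mp hc).symm)]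
        · -- skipped: prefix but not longer than best_length
          have hL : loopA case ((k, v) :: t) (b, (l : Int)) = loopA case t (b, (l : Int)) := by
            simp only [loopA]
            rw [if_pos (hsw.mpr hpre),
              if_neg (show ¬ PySem.Str.len k > ((b, (l : Int)).2) by
                rw [hlen]; show ¬ (k.toList.length : Int) > ((l : Nat) : Int)
                exact_mod_cast hgt)]
          have hR : bl case.toList ((k, v) :: t) l = bl case.toList t l := by
            simp only [bl]; rw [if_neg (fun hc => hgt hc.2)]
          rw [hL, hR, ih b l hl]
          have hge : l ≤ bl case.toList t l := bl_le _ _ _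
          have hle : bl case.toList t l ≤ case.toList.length := bl_le_len _ _ _ hl
          by_cases he : bl case.toList t l = l
          · rw [if_pos he, if_pos he]
          · rw [if_neg he, if_neg he]
            simp only [lkp]
            rw [if_neg (fun hc => by
              have := (take_eq_iff hpre hle).mp hc
              omega)]
      · -- not a prefix: skipped
        have hL : loopA case ((k, v) :: t) (b, (l : Int)) = loopA case t (b, (l : Int)) := by
          simp only [loopA]
          rw [if_neg (fun hc => hpre (hsw.mp hc))]
        have hR : bl case.toList ((k, v) :: t) l = bl case.toList t l := by
          simp only [bl]; rw [if_neg (fun hc => hpre hc.1)]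
        rw [hL, hR, ih b l hl]
        by_cases he : bl case.toList t l = l
        · rw [if_pos he, if_pos he]
        · rw [if_neg he, if_neg he]
          simp only [lkp]
          rw [if_neg (fun hc => hpre (by rw [hc]; exact List.take_prefix _ _))]

-- the probed prefix case[:L] is take L on the char list
theorem slice_toList (case : String) (L : Nat) :
    (PySem.Str.slice case none (some ((L : Nat) : Int))).toList = case.toList.take L := by
  simp [PySem.Str.toList_slice, PySem.List.slice_to_natCast]

theorem lkp_some_mem (d : List (String × String)) :
    ∀ {key : List Char} {m : String}, lkp d key = some m →
      ∃ k v, (k, v) ∈ d ∧ k.toList = key := by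
  induction d with
  | nil => intro _ _ h; simp [lkp] at h
  | cons p t ih =>
      intro key m h
      obtain ⟨k', v'⟩ := p
      simp only [lkp] at h
      split_ifs at h with he
      · exact ⟨k', v', List.mem_cons_self .., he⟩
      · obtain ⟨k, v, hm, hk⟩ := ih h
        exact ⟨k, v, List.mem_cons_of_mem _ hm, hk⟩

-- characterization of B's loop
theorem loopB_eq (case : String) (d : List (String × String)) (n : Nat)
    (hM : bl case.toList d 0 ≤ n) (hn : n ≤ case.toList.length) :
    loopB case d n =
      if bl case.toList d 0 = 0 then none
      else lkp d (case.toList.take (bl case.toList d 0)) := by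
  induction n with
  | zero =>
      have : bl case.toList d 0 = 0 := Nat.le_zero.mp hM
      simp [loopB, this]
  | succ L ih =>
      set M := bl case.toList d 0 with hMdef
      simp only [loopB, lookupB_eq_lkp, slice_toList]
      rcases hfind : lkp d (case.toList.take (L + 1)) with _ | m
      · -- no key of length L+1: M ≤ L
        have hMne : M ≠ L + 1 := by
          intro hc
          rcases bl_ach case.toList d 0 with he | ⟨k, v, hm, hp, hlk⟩
          · omega
          · have : k.toList = case.toList.take (L + 1) :=
              (take_eq_iff hp (by omega)).mpr (by omega)
            have := lkp_isSome d hm this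
            rw [hfind] at this; simp at this
        exact ih (by omega) (by omega)
      · -- hit: M = L+1
        obtain ⟨k, v, hm, hk⟩ := lkp_some_mem d hfind
        have hklen : k.toList.length = L + 1 := by rw [hk, List.length_take]; omega
        have hkpre : k.toList <+: case.toList := hk ▸ List.take_prefix _ _
        have hMge : L + 1 ≤ M := hklen ▸ bl_ge case.toList d 0 hm hkpre
        have hMeq : M = L + 1 := by omega
        rw [if_neg (by omega), hMeq, hfind]

theorem foldMax_seed_mono (d : List (String × String)) :
    ∀ {m m' : Nat}, m ≤ m' →
      d.foldl (fun m p => max m p.1.toList.length) m ≤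
        d.foldl (fun m p => max m p.1.toList.length) m' := by
  induction d with
  | nil => intro _ _ h; simpa using h
  | cons p t ih =>
      intro m m' h
      simp only [List.foldl]
      exact ih (by omega)

theorem bl_le_foldMax (cs : List Char) (d : List (String × String)) :
    ∀ l : Nat, bl cs d l ≤ d.foldl (fun m p => max m p.1.toList.length) l := by
  induction d with
  | nil => intro l; simp [bl]
  | cons p t ih =>
      intro l
      obtain ⟨k, v⟩ := p
      simp only [bl, List.foldl]
      split_ifs with h
      · exact le_trans (ih _) (foldMax_seed_mono t (by omega))
      · exact le_trans (ih _) (foldMax_seed_mono t (by omega))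

theorem bl_le_maxKeyLen (cs : List Char) (d : List (String × String)) :
    bl cs d 0 ≤ maxKeyLen d := bl_le_foldMax cs d 0

theorem main_eq (case : String) (d : List (String × String)) :
    module_for_case_py case d = module_for_case_py_alt case d := by
  unfold module_for_case_py module_for_case_py_alt
  have h0 : ((0 : Nat) : Int) = (0 : Int) := rfl
  rw [← h0, loopA_fst case d none 0 (Nat.zero_le _),
    loopB_eq case d (min case.toList.length (maxKeyLen d))
      (le_min (bl_le_len _ _ _ (Nat.zero_le _)) (bl_le_maxKeyLen _ _))
      (min_le_left _ _)]

-- ===== VERDICT (by name: the statement is the Claim_ definition above) =====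
theorem module_for_case_py_spec : Claim_equal_module_for_case_py := by
  intro case d _
  exact main_eq case d
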